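-- pv_equiv track=rewrite | github.com/kgh1379/snuh-exam-prep | build_flashcard.py | join_question_lines
-- ===== SOURCE A (Python) =====
-- def join_question_lines(lines):
--     """Join question lines: consecutive non-empty lines with space, blank lines as \\n."""
--     result = []
--     current = []
--     for line in lines:
--         if line.strip():
--             current.append(line.strip())
--         else:
--             if current:
--                 result.append(" ".join(current))
--                 current = []
--     if current:
--         result.append(" ".join(current))
--     return "\n".join(result)
-- ===== SOURCE B (Python) =====
-- def join_question_lines(lines):
--     """Join question lines: consecutive non-empty lines with space, blank lines as \n."""
--     segments = []
--     i = 0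
--     n = len(lines)
--     while i < n:
--         key = bool(lines[i].strip())
--         j = i
--         while j < n and bool(lines[j].strip()) == key:
--             j += 1
--         if key:
--             segments.append(" ".join(x.strip() for x in lines[i:j]))
--         i = j
--     return "\n".join(segments)
-- ===== Notes on version B (the rewrite author's own statement) =====
-- stated objective: alternative
-- what changed: B scans with two indices (a groupby-style segmentation): it finds each maximal run of same-blankness lines and joins the non-blank runs directly, instead of A's accumulator that is flushed on every blank line and once more at the end.
import Mathlib
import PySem

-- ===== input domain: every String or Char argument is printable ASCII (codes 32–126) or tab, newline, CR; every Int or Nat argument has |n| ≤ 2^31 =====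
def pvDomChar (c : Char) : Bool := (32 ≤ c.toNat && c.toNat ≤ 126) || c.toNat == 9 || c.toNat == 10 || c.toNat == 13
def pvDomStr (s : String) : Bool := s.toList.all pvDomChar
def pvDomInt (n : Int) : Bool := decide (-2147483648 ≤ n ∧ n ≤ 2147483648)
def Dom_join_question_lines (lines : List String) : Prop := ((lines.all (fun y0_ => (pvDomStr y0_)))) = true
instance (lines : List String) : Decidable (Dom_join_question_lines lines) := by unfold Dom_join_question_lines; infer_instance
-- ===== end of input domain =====

-- B replaces A's flush-on-blank accumulator by a groupby-style scan over maximal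
-- runs of same-blankness lines (objective: alternative decomposition, same cost).

-- ===== PORT A =====
-- A: fold over the lines carrying (result, current); non-blank lines extend current,
-- a blank line flushes a non-empty current into result; final flush, then "\n".join.
def join_question_lines (lines : List String) : String :=
  let st := lines.foldl
    (fun (st : List String × List String) line =>
      if PySem.Str.strip line ≠ "" then (st.1, st.2 ++ [PySem.Str.strip line])
      else if st.2 ≠ [] then (st.1 ++ [PySem.Str.join " " st.2], ([] : List String))
      else st)
    (([] : List String), ([] : List String))
  let result := if st.2 ≠ [] then st.1 ++ [PySem.Str.join " " st.2] else st.1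
  PySem.Str.join "\n" result

-- ===== PORT B =====
-- B: repeatedly take the maximal run of lines with the same blankness as the current head
-- (Source B's inner `while j` loop = takeWhile/dropWhile on that predicate); a non-blank run
-- contributes its stripped lines joined by " ", a blank run contributes nothing.
def pvSegmentsB : List String → List String
  | [] => []
  | x :: xs =>
      (if PySem.Str.strip x != "" then
        [PySem.Str.join " " (((x :: xs).takeWhile
            (fun y => (PySem.Str.strip y != "") == (PySem.Str.strip x != ""))).map PySem.Str.strip)]
      else []) ++
      pvSegmentsB ((x :: xs).dropWhile (fun y => (PySem.Str.strip y != "") == (PySem.Str.strip x != "")))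
termination_by lines => lines.length
decreasing_by
  rw [List.dropWhile_cons_of_pos (by simp)]
  exact Nat.lt_succ_of_le (List.length_dropWhile_le _ _)

def join_question_lines_alt (lines : List String) : String :=
  PySem.Str.join "\n" (pvSegmentsB lines)

-- ===== PRECONDITION & SPEC =====
def Spec_join_question_lines (lines : List String) (out : String) : Prop := out = join_question_lines_alt lines
instance (lines : List String) (out : String) : Decidable (Spec_join_question_lines lines out) := by unfold Spec_join_question_lines; infer_instance

-- ===== CLAIM (what is proved, stated in full; the proofs are below) =====
def Claim_equal_join_question_lines : Prop := ∀ (lines : List String), Dom_join_question_lines lines → Spec_join_question_lines lines (join_question_lines lines)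

-- ===== LEMMAS AND PROOFS =====

-- Reference: the segment list with an explicit pending run `cur` of already-stripped lines.
def pvSegs : List String → List String → List String
  | [], cur => if cur = [] then [] else [PySem.Str.join " " cur]
  | l :: ls, cur =>
      if PySem.Str.strip l = "" then
        (if cur = [] then [] else [PySem.Str.join " " cur]) ++ pvSegs ls []
      else pvSegs ls (cur ++ [PySem.Str.strip l])

-- A's fold, started from any (res, cur) and finalized, equals res ++ pvSegs lines cur.
theorem pvA_eq_segs (lines : List String) : ∀ (res cur : List String),
    (let st := lines.foldl
      (fun (st : List String × List String) line =>
        if PySem.Str.strip line ≠ "" then (st.1, st.2 ++ [PySem.Str.strip line])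
        else if st.2 ≠ [] then (st.1 ++ [PySem.Str.join " " st.2], ([] : List String))
        else st) (res, cur)
     if st.2 ≠ [] then st.1 ++ [PySem.Str.join " " st.2] else st.1)
    = res ++ pvSegs lines cur := by
  induction lines with
  | nil =>
      intro res cur
      simp only [List.foldl_nil, pvSegs]
      split_ifs <;> simp_all
  | cons l ls ih =>
      intro res cur
      by_cases hl : PySem.Str.strip l = ""
      · by_cases hc : cur = []
        · subst hc
          simpa [pvSegs, hl] using ih res []
        · have h2 := ih (res ++ [PySem.Str.join " " cur]) []
          simp only [pvSegs, hl, if_pos, hc, List.foldl_cons] at h2 ⊢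
          simp only [List.append_assoc] at h2
          simpa [hl, hc] using h2
      · have h2 := ih res (cur ++ [PySem.Str.strip l])
        simp only [pvSegs, hl, List.foldl_cons] at h2 ⊢
        simpa [hl] using h2

-- pvSegs one-step equations under the blankness of the head.
theorem pvSegs_cons_nonblank {l : String} (ls cur : List String)
    (hy : PySem.Str.strip l ≠ "") :
    pvSegs (l :: ls) cur = pvSegs ls (cur ++ [PySem.Str.strip l]) := by
  simp [pvSegs, hy]

theorem pvSegs_cons_blank {l : String} (ls cur : List String)
    (hy : PySem.Str.strip l = "") :
    pvSegs (l :: ls) cur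
      = (if cur = [] then [] else [PySem.Str.join " " cur]) ++ pvSegs ls [] := by
  simp [pvSegs, hy]

-- Pushing a run of non-blank lines through pvSegs extends the pending run.
theorem pvSegs_nonblank (g : List String) : ∀ (rest cur : List String),
    (∀ y ∈ g, PySem.Str.strip y ≠ "") →
    pvSegs (g ++ rest) cur = pvSegs rest (cur ++ g.map PySem.Str.strip) := by
  induction g with
  | nil => intro rest cur _; simp
  | cons y t ih =>
      intro rest cur h
      have hy : PySem.Str.strip y ≠ "" := h y (by simp)
      rw [List.cons_append, pvSegs_cons_nonblank _ _ hy,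
        ih rest (cur ++ [PySem.Str.strip y]) (fun z hz => h z (by simp [hz]))]
      simp

-- A run of blank lines with no pending run contributes nothing.
theorem pvSegs_blank (g : List String) : ∀ (rest : List String),
    (∀ y ∈ g, PySem.Str.strip y = "") →
    pvSegs (g ++ rest) [] = pvSegs rest [] := by
  induction g with
  | nil => intro rest _; simp
  | cons y t ih =>
      intro rest h
      have hy : PySem.Str.strip y = "" := h y (by simp)
      rw [List.cons_append, pvSegs_cons_blank _ _ hy,
        ih rest (fun z hz => h z (by simp [hz]))]
      simp

-- Flushing a non-empty pending run at a segment boundary (end of input or blank head).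
theorem pvSegs_flush (rest cur : List String) (hc : cur ≠ [])
    (hrest : rest = [] ∨ ∃ b t, rest = b :: t ∧ PySem.Str.strip b = "") :
    pvSegs rest cur = PySem.Str.join " " cur :: pvSegs rest [] := by
  rcases hrest with h | ⟨b, t, rfl, hb⟩
  · subst h; simp [pvSegs, hc]
  · rw [pvSegs_cons_blank _ _ hb, pvSegs_cons_blank _ _ hb]
    simp [hc]

-- B's segment list equals the reference with empty pending run (strong induction on length).
theorem pvB_eq_segs_aux (n : Nat) : ∀ (lines : List String), lines.length ≤ n →
    pvSegmentsB lines = pvSegs lines [] := by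
  induction n with
  | zero =>
      intro lines h
      cases lines with
      | nil => simp [pvSegmentsB, pvSegs]
      | cons x xs => simp at h
  | succ n ih =>
      intro lines h
      cases lines with
      | nil => simp [pvSegmentsB, pvSegs]
      | cons x xs =>
        rw [pvSegmentsB]
        have hsplit : (x :: xs).takeWhile
              (fun y => (PySem.Str.strip y != "") == (PySem.Str.strip x != "")) ++
            (x :: xs).dropWhile
              (fun y => (PySem.Str.strip y != "") == (PySem.Str.strip x != "")) = x :: xs :=
          List.takeWhile_append_dropWhile
        have hlen : ((x :: xs).dropWhile
              (fun y => (PySem.Str.strip y != "") == (PySem.Str.strip x != ""))).length ≤ n := by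
          rw [List.dropWhile_cons_of_pos (by simp)]
          have := List.length_dropWhile_le
            (fun y => (PySem.Str.strip y != "") == (PySem.Str.strip x != "")) xs
          simp at h; omega
        have ihrest := ih _ hlen
        have hpfalse : ∀ (b : String) (t : List String),
            (x :: xs).dropWhile
              (fun y => (PySem.Str.strip y != "") == (PySem.Str.strip x != "")) = b :: t →
            ((PySem.Str.strip b != "") == (PySem.Str.strip x != "")) = false := by
          intro b t hr
          have hne : (x :: xs).dropWhile
              (fun y => (PySem.Str.strip y != "") == (PySem.Str.strip x != "")) ≠ [] := by
            rw [hr]; simp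
          have hh := List.head_dropWhile_not
            (fun y => (PySem.Str.strip y != "") == (PySem.Str.strip x != "")) hne
          rwa [show ((x :: xs).dropWhile
              (fun y => (PySem.Str.strip y != "") == (PySem.Str.strip x != ""))).head hne = b
            from by rw [List.head_eq_iff_head?_eq_some]; rw [hr]; rfl] at hh
        by_cases hx : PySem.Str.strip x = ""
        · -- blank run: every line of the run strips to ""
          have hg : ∀ y ∈ (x :: xs).takeWhile
                (fun y => (PySem.Str.strip y != "") == (PySem.Str.strip x != "")),
              PySem.Str.strip y = "" := by
            intro y hy
            have ht := List.mem_takeWhile_imp hy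
            rw [beq_iff_eq] at ht
            have hxb : (PySem.Str.strip x != "") = false := by simp [hx]
            rw [hxb] at ht
            simpa using ht
          rw [ihrest]
          conv_rhs => rw [← hsplit]
          rw [pvSegs_blank _ _ hg]
          simp [hx]
        · -- non-blank run: every line of the run strips non-empty
          have hxb : (PySem.Str.strip x != "") = true := by simpa [bne_iff_ne] using hx
          have hg : ∀ y ∈ (x :: xs).takeWhile
                (fun y => (PySem.Str.strip y != "") == (PySem.Str.strip x != "")),
              PySem.Str.strip y ≠ "" := by
            intro y hy
            have ht := List.mem_takeWhile_imp hy
            rw [beq_iff_eq, hxb] at ht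
            exact bne_iff_ne.mp ht
          have hxg : x ∈ (x :: xs).takeWhile
              (fun y => (PySem.Str.strip y != "") == (PySem.Str.strip x != "")) := by
            rw [List.takeWhile_cons_of_pos (by simp)]; simp
          have hmapne : ((x :: xs).takeWhile
              (fun y => (PySem.Str.strip y != "") == (PySem.Str.strip x != ""))).map
              PySem.Str.strip ≠ [] := by
            intro hk
            rw [List.map_eq_nil_iff] at hk
            rw [hk] at hxg; cases hxg
          have hrest : (x :: xs).dropWhile
                (fun y => (PySem.Str.strip y != "") == (PySem.Str.strip x != "")) = [] ∨
              ∃ b t, (x :: xs).dropWhile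
                (fun y => (PySem.Str.strip y != "") == (PySem.Str.strip x != "")) = b :: t ∧
                PySem.Str.strip b = "" := by
            cases hr : (x :: xs).dropWhile
                (fun y => (PySem.Str.strip y != "") == (PySem.Str.strip x != "")) with
            | nil => exact Or.inl rfl
            | cons b t =>
              refine Or.inr ⟨b, t, rfl, ?_⟩
              have hb := hpfalse b t hr
              rw [hxb] at hb
              simpa using hb
          rw [ihrest]
          conv_rhs => rw [← hsplit]
          rw [pvSegs_nonblank _ _ _ hg, List.nil_append,
            pvSegs_flush _ _ hmapne hrest, hxb]
          simp

theorem pvB_eq_segs (lines : List String) : pvSegmentsB lines = pvSegs lines [] :=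
  pvB_eq_segs_aux lines.length lines le_rfl

-- ===== VERDICT (by name: the statement is the Claim_ definition above) =====
theorem join_question_lines_spec : Claim_equal_join_question_lines := by
  intro lines _
  show join_question_lines lines = join_question_lines_alt lines
  unfold join_question_lines join_question_lines_alt
  rw [pvB_eq_segs,
    show pvSegs lines [] = [] ++ pvSegs lines [] from (List.nil_append _).symm,
    ← pvA_eq_segs lines [] []]
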